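-- pv_equiv track=rewrite | github.com/shru2813/special_sequence | special_sequence.py | special_Sequence_AG
-- ===== SOURCE A (Python) =====
-- def special_Sequence_AG(s):
--  A_Count = 0
--  res = 0
--  for c in s:
--     if c == "A":
--         A_Count  += 1
--     elif c == "G":
--         res += A_Count
--  return res
-- ===== SOURCE B (Python) =====
-- def special_Sequence_AG(s):
--     res = 0
--     for i in range(len(s)):
--         if s[i] == "G":
--             res += s[:i].count("A")
--     return res
-- ===== Notes on version B (the rewrite author's own statement) =====
-- stated objective: alternative
-- what changed: Replaces the single-pass running A-counter with an independent prefix rescan per 'G': for each index holding 'G', B counts 'A' in the prefix s[:i] and sums those counts.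
import Mathlib
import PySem

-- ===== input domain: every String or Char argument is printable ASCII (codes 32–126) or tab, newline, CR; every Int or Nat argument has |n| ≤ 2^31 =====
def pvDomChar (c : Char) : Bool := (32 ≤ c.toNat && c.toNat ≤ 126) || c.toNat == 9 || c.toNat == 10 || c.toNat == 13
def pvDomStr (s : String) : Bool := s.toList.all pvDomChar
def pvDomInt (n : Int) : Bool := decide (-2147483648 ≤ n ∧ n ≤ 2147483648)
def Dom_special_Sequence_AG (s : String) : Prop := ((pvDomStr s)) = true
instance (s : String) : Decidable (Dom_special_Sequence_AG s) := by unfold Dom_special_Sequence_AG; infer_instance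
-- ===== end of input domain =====

-- B replaces A's single-pass running A-counter with an independent prefix rescan per 'G' (alternative decomposition, not faster).


-- ===== PORT A =====
-- A: one pass, running A-counter, add counter at every 'G'.
def pvGoA : List Char → Int → Int → Int
  | [], _, res => res
  | c :: cs, a, res =>
      if c = 'A' then pvGoA cs (a + 1) res
      else if c = 'G' then pvGoA cs a (res + a)
      else pvGoA cs a res

def special_Sequence_AG (s : String) : Int := pvGoA s.toList 0 0

-- ===== PORT B =====
-- B: for each index i in range(len(s)), if s[i]=='G' add the count of 'A' in the prefix s[:i].
def special_Sequence_AG_alt (s : String) : Int :=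
  (List.range s.toList.length).foldl
    (fun res i =>
      if s.toList.getD i ' ' = 'G' then res + ((s.toList.take i).count 'A' : Int) else res)
    0

-- ===== PRECONDITION & SPEC =====
def Spec_special_Sequence_AG (s : String) (out : Int) : Prop := out = special_Sequence_AG_alt s
instance (s : String) (out : Int) : Decidable (Spec_special_Sequence_AG s out) := by unfold Spec_special_Sequence_AG; infer_instance

-- ===== CLAIM (what is proved, stated in full; the proofs are below) =====
def Claim_equal_special_Sequence_AG : Prop := ∀ (s : String), Dom_special_Sequence_AG s → Spec_special_Sequence_AG s (special_Sequence_AG s)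

-- ===== LEMMAS AND PROOFS =====

-- shared closed form: S l a = pairs contributed by l given a 'A's already seen
def pvS : List Char → Int → Int
  | [], _ => 0
  | c :: cs, a => (if c = 'G' then a else 0) + pvS cs (a + if c = 'A' then 1 else 0)

lemma pvGoA_eq_S : ∀ (l : List Char) (a res : Int), pvGoA l a res = res + pvS l a := by
  intro l
  induction l with
  | nil => intro a res; simp [pvGoA, pvS]
  | cons c cs ih =>
    intro a res
    by_cases hA : c = 'A'
    · simp [pvGoA, pvS, hA, ih]
    · by_cases hG : c = 'G'
      · simp [pvGoA, pvS, hA, hG, ih]; ring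
      · simp [pvGoA, pvS, hA, hG, ih]

-- B's fold with an extra constant k added to every prefix count
def pvBf (l : List Char) (k res : Int) : Int :=
  (List.range l.length).foldl
    (fun r i => if l.getD i ' ' = 'G' then r + (((l.take i).count 'A' : Int) + k) else r) res

lemma pvBf_cons (c : Char) (cs : List Char) (k res : Int) :
    pvBf (c :: cs) k res
      = pvBf cs (k + if c = 'A' then 1 else 0) (if c = 'G' then res + k else res) := by
  unfold pvBf
  rw [show (c :: cs).length = cs.length + 1 from rfl, List.range_succ_eq_map, List.foldl_cons,
    List.foldl_map]
  have h0 : (if (c :: cs).getD 0 ' ' = 'G'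
      then res + ((((c :: cs).take 0).count 'A' : Int) + k) else res)
      = (if c = 'G' then res + k else res) := by
    by_cases hG : c = 'G' <;> simp [hG]
  rw [h0]
  congr 1
  funext r i
  have hg : (c :: cs).getD (i + 1) ' ' = cs.getD i ' ' := rfl
  have ht : ((c :: cs).take (i + 1)).count 'A' = (if c = 'A' then 1 else 0) + (cs.take i).count 'A' := by
    by_cases hA : c = 'A' <;> simp [List.take_succ_cons, List.count_cons, hA] <;> omega
  rw [hg, ht]
  by_cases h : cs.getD i ' ' = 'G' <;> simp [h] <;> push_cast <;> ring

lemma pvBf_eq_S : ∀ (l : List Char) (k res : Int), pvBf l k res = res + pvS l k := by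
  intro l
  induction l with
  | nil => intro k res; simp [pvBf, pvS]
  | cons c cs ih =>
    intro k res
    rw [pvBf_cons, ih, pvS]
    by_cases hG : c = 'G' <;> simp [hG] <;> ring

-- ===== VERDICT (by name: the statement is the Claim_ definition above) =====
theorem special_Sequence_AG_spec : Claim_equal_special_Sequence_AG := by
  intro s _
  unfold Spec_special_Sequence_AG special_Sequence_AG special_Sequence_AG_alt
  have hB : (List.range s.toList.length).foldl
      (fun res i =>
        if s.toList.getD i ' ' = 'G' then res + ((s.toList.take i).count 'A' : Int) else res) 0
      = pvBf s.toList 0 0 := by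
    simp [pvBf]
  simp only [pvGoA_eq_S, hB, pvBf_eq_S]
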